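-- pv_equiv track=rewrite | github.com/Shmoogster/PIAA | lb5/Joker.py | remove_found_patterns
-- ===== SOURCE A (Python) =====
-- def remove_found_patterns(text, results, patterns):
--     """Вырезает найденные образцы из строки и возвращает остаток"""
--     if not results:
--         return text
--
--     # Создаем массив для отметки позиций, которые нужно удалить
--     remove_mask = [False] * len(text)
--
--     # Помечаем позиции, которые попадают в найденные образцы
--     for start_pos, pattern_idx, pattern_length in results:
--         end_pos = start_pos + pattern_length
--
--         # Проверяем границы и помечаем позиции для удаления
--         for i in range(max(0, start_pos), min(len(text), end_pos)):
--             remove_mask[i] = True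
--
--     # Собираем остаток строки
--     remainder = []
--     for i, char in enumerate(text):
--         if not remove_mask[i]:
--             remainder.append(char)
--
--     return ''.join(remainder)
-- ===== SOURCE B (Python) =====
-- def remove_found_patterns(text, results, patterns):
--     """Вырезает найденные образцы из строки и возвращает остаток"""
--     return ''.join(c for i, c in enumerate(text)
--                    if not any(s <= i < s + l for s, _, l in results))
-- ===== Notes on version B (the rewrite author's own statement) =====
-- stated objective: simpler
-- what changed: B drops A's early return, boolean remove-mask array and per-interval range-marking loops entirely: it is a single comprehension keeping each character whose index is covered by no interval.
import Mathlib
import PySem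

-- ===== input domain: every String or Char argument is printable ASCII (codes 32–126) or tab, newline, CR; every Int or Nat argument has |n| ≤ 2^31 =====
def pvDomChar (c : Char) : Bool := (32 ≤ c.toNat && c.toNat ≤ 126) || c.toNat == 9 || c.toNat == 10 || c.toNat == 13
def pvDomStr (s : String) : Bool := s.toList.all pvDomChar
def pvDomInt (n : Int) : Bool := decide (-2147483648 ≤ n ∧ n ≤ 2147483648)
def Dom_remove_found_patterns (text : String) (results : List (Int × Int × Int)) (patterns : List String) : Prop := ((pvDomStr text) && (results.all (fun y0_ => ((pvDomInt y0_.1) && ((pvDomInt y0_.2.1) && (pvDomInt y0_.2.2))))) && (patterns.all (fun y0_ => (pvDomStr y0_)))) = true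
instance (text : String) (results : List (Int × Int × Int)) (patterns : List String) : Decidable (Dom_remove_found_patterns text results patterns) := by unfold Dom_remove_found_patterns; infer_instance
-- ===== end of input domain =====

-- B drops A's boolean remove-mask and its per-interval marking loops: each character is kept
-- iff no interval covers its index (objective: simpler; not faster).

-- ===== PORT A =====
-- literal transliteration of A: early return, a mask marked range by range, then a
-- gathering loop over enumerate(text).  'remove_mask[i] = True' is List.set i.toNat:
-- exact, since every i produced by range(max(0,s), min(n, s+l)) satisfies 0 ≤ i < n.
def remove_found_patterns (text : String) (results : List (Int × Int × Int)) (patterns : List String) : String :=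
  if results = [] then text
  else
    let cs := text.toList
    let mask := results.foldl (fun m r =>
        (PySem.List.pyRange (max 0 r.1) (min (cs.length : Int) (r.1 + r.2.2)) 1).foldl
          (fun m i => m.set i.toNat true) m)
      (List.replicate cs.length false)
    let remainder := (PySem.List.enumerate cs 0).foldl
      (fun acc p => if !(PySem.List.pyGetD mask p.1 false) then acc ++ [p.2] else acc) []
    String.ofList remainder

-- ===== PORT B =====
def remove_found_patterns_alt (text : String) (results : List (Int × Int × Int)) (patterns : List String) : String :=
  String.ofList (((PySem.List.enumerate text.toList 0).filter
      (fun p => !(results.any (fun r => decide (r.1 ≤ p.1) && decide (p.1 < r.1 + r.2.2))))).map (·.2))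

-- ===== PRECONDITION & SPEC =====
def Spec_remove_found_patterns (text : String) (results : List (Int × Int × Int)) (patterns : List String) (out : String) : Prop := out = remove_found_patterns_alt text results patterns
instance (text : String) (results : List (Int × Int × Int)) (patterns : List String) (out : String) : Decidable (Spec_remove_found_patterns text results patterns out) := by unfold Spec_remove_found_patterns; infer_instance

-- ===== CLAIM (what is proved, stated in full; the proofs are below) =====
def Claim_equal_remove_found_patterns : Prop := ∀ (text : String) (results : List (Int × Int × Int)) (patterns : List String), Dom_remove_found_patterns text results patterns → Spec_remove_found_patterns text results patterns (remove_found_patterns text results patterns)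

-- ===== LEMMAS AND PROOFS =====

-- folding 'set j.toNat true' keeps the length
theorem pv_len_set_fold (js : List Int) (m : List Bool) :
    (js.foldl (fun m i => m.set i.toNat true) m).length = m.length := by
  induction js generalizing m with
  | nil => rfl
  | cons j js ih => simp [List.foldl, ih, List.length_set]

-- value at k after folding 'set j.toNat true' over a list of nonnegative indices
theorem pv_getD_set_fold (js : List Int) (m : List Bool) (k : Nat)
    (hk : k < m.length) (hnn : ∀ j ∈ js, 0 ≤ j) :
    (js.foldl (fun m i => m.set i.toNat true) m).getD k false
      = (m.getD k false || js.any (fun j => j == (k : Int))) := by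
  induction js generalizing m with
  | nil => simp
  | cons j js ih =>
    have hj : 0 ≤ j := hnn j (by simp)
    rw [List.foldl_cons, ih _ (by simp [List.length_set]; omega) (fun x hx => hnn x (by simp [hx]))]
    by_cases hjk : j = (k : Int)
    · subst hjk
      simp [List.getD_eq_getElem?_getD, List.getElem?_set, hk]
    · have hne : j.toNat ≠ k := by omega
      have hb : (j == (k : Int)) = false := beq_eq_false_iff_ne.mpr hjk
      simp [List.getD_eq_getElem?_getD, List.getElem?_set_ne hne, hb]

-- the covering predicate of B
def pvCovered (results : List (Int × Int × Int)) (i : Int) : Bool :=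
  results.any (fun r => decide (r.1 ≤ i) && decide (i < r.1 + r.2.2))

-- the mask built by A reads, at any in-range index k, exactly B's covering test
theorem pv_mask_char (results : List (Int × Int × Int)) (m : List Bool) (n : Nat) (k : Nat)
    (hlen : m.length = n) (hk : k < n) :
    ((results.foldl (fun m r =>
        (PySem.List.pyRange (max 0 r.1) (min (n : Int) (r.1 + r.2.2)) 1).foldl
          (fun m i => m.set i.toNat true) m) m).getD k false)
      = (m.getD k false || pvCovered results (k : Int)) := by
  induction results generalizing m with
  | nil => simp [pvCovered]
  | cons r rs ih =>
    rw [List.foldl_cons,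
      ih _ (by rw [pv_len_set_fold]; exact hlen),
      pv_getD_set_fold _ _ _ (by omega) (fun j hj => by
        have := (PySem.List.mem_pyRange_one.mp hj).1; omega)]
    have harr : ((PySem.List.pyRange (max 0 r.1) (min (n : Int) (r.1 + r.2.2)) 1).any
        (fun j => j == (k : Int)))
        = (decide (r.1 ≤ (k : Int)) && decide ((k : Int) < r.1 + r.2.2)) := by
      by_cases hc : r.1 ≤ (k : Int) ∧ (k : Int) < r.1 + r.2.2
      · have h1 : ((PySem.List.pyRange (max 0 r.1) (min (n : Int) (r.1 + r.2.2)) 1).any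
            (fun j => j == (k : Int))) = true := by
          simp only [List.any_eq_true]
          exact ⟨(k : Int), PySem.List.mem_pyRange_one.mpr ⟨by omega, by omega⟩, by simp⟩
        rw [h1]
        simp [hc.1, hc.2]
      · have h1 : ((PySem.List.pyRange (max 0 r.1) (min (n : Int) (r.1 + r.2.2)) 1).any
            (fun j => j == (k : Int))) = false := by
          simp only [List.any_eq_false]
          intro j hj
          have hmem := PySem.List.mem_pyRange_one.mp hj
          simp only [beq_iff_eq]
          omega
        rw [h1]
        rcases not_and_or.mp hc with h | h <;> simp [h]
    rw [harr]
    simp only [pvCovered, List.any_cons]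
    rw [Bool.or_assoc, Bool.or_left_comm]

-- when there are no results nothing is covered, so B returns the text unchanged
theorem pv_alt_nil (text : String) (patterns : List String) :
    remove_found_patterns_alt text [] patterns = text := by
  unfold remove_found_patterns_alt
  simp [PySem.List.map_snd_enumerate, String.ofList_toList]

theorem pv_main (text : String) (results : List (Int × Int × Int)) (patterns : List String) :
    remove_found_patterns text results patterns = remove_found_patterns_alt text results patterns := by
  unfold remove_found_patterns
  by_cases hres : results = []
  · simp [hres, pv_alt_nil]
  · rw [if_neg hres]
    unfold remove_found_patterns_alt
    simp only []
    rw [PySem.List.foldl_append_if]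
    simp only [List.nil_append]
    congr 1
    refine congrArg (List.map Prod.snd) (List.filter_congr fun p hp => ?_)
    obtain ⟨k, hk, rfl⟩ := (PySem.List.mem_enumerate_iff _ _ _).mp hp
    have hmask := pv_mask_char results (List.replicate text.toList.length false)
      text.toList.length k (by simp) hk
    simp only [List.getD_eq_getElem?_getD, List.getElem?_replicate] at hmask
    have h0 : PySem.List.pyGetD
        (results.foldl (fun m r =>
          (PySem.List.pyRange (max 0 r.1) (min ((text.toList.length : Int)) (r.1 + r.2.2)) 1).foldl
            (fun m i => m.set i.toNat true) m) (List.replicate text.toList.length false))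
        ((0 : Int) + k) false
        = pvCovered results (k : Int) := by
      rw [show ((0 : Int) + k) = ((k : Nat) : Int) by omega, PySem.List.pyGetD_natCast]
      rw [List.getD_eq_getElem?_getD, hmask]
      have hk2 : k < text.length := by simpa using hk
      simp [hk, hk2]
    rw [h0]
    simp [pvCovered, show ((0 : Int) + k) = ((k : Nat) : Int) by omega]

-- ===== VERDICT (by name: the statement is the Claim_ definition above) =====
theorem remove_found_patterns_spec : Claim_equal_remove_found_patterns := by
  intro text results patterns _
  unfold Spec_remove_found_patterns
  exact pv_main text results patterns
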